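-- pv_equiv track=rewrite | github.com/youtubediscord/zapret | src/preset_zapret1/sync_layer.py | _split_preset_text_sections
-- ===== SOURCE A (Python) =====
-- def _split_preset_text_sections(content: str) -> tuple[list[str], list[str], list[list[str]]]:
--     text = (content or "").replace("\r\n", "\n").replace("\r", "\n")
--     lines = text.split("\n")
--
--     header_lines: list[str] = []
--     content_start_idx = 0
--     for i, raw in enumerate(lines):
--         stripped = raw.strip()
--         if stripped.startswith("#") or not stripped:
--             header_lines.append(raw)
--             content_start_idx = i + 1
--             continue
--         content_start_idx = i
--         break
--     else:
--         return header_lines, [], []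
--
--     remaining = lines[content_start_idx:]
--     first_filter_idx = None
--     for i, raw in enumerate(remaining):
--         stripped = raw.strip().lower()
--         if stripped.startswith("--filter-tcp") or stripped.startswith("--filter-udp") or stripped.startswith("--filter-l7"):
--             first_filter_idx = i
--             break
--
--     if first_filter_idx is None:
--         base_lines = [ln.strip() for ln in remaining if ln.strip() and not ln.strip().startswith("#")]
--         return header_lines, base_lines, []
--
--     base_lines = [
--         ln.strip()
--         for ln in remaining[:first_filter_idx]
--         if ln.strip() and not ln.strip().startswith("#")
--     ]
--
--     blocks: list[list[str]] = []
--     current: list[str] = []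
--     for raw in remaining[first_filter_idx:]:
--         stripped = raw.strip()
--         if not stripped or stripped.startswith("#"):
--             continue
--         if stripped == "--new":
--             if current:
--                 blocks.append(current)
--                 current = []
--             continue
--         current.append(stripped)
--
--     if current:
--         blocks.append(current)
--
--     return header_lines, base_lines, blocks
-- ===== SOURCE B (Python) =====
-- def _split_preset_text_sections(content: str) -> tuple[list[str], list[str], list[list[str]]]:
--     lines = (content or "").replace("\r\n", "\n").replace("\r", "\n").split("\n")
--
--     header_lines: list[str] = []
--     base_lines: list[str] = []
--     blocks: list[list[str]] = []
--     current: list[str] = []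
--     state = "header"
--
--     for raw in lines:
--         stripped = raw.strip()
--         if state == "header":
--             if not stripped or stripped.startswith("#"):
--                 header_lines.append(raw)
--                 continue
--             state = "base"
--         if state == "base":
--             low = stripped.lower()
--             if low.startswith("--filter-tcp") or low.startswith("--filter-udp") or low.startswith("--filter-l7"):
--                 state = "filter"
--             else:
--                 if stripped and not stripped.startswith("#"):
--                     base_lines.append(stripped)
--                 continue
--         # state == "filter"
--         if not stripped or stripped.startswith("#"):
--             continue
--         if stripped == "--new":
--             if current:
--                 blocks.append(current)
--                 current = []
--             continue
--         current.append(stripped)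
--
--     if current:
--         blocks.append(current)
--
--     return header_lines, base_lines, blocks
-- ===== Notes on version B (the rewrite author's own statement) =====
-- stated objective: alternative
-- what changed: Replaces A's three separate phases (indexed header scan, first-filter-index search, slicing plus a comprehension and a fold) with one single-pass header/base/filter state machine over the lines, eliminating the slicing and the separate first_filter_idx scan.
import Mathlib
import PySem

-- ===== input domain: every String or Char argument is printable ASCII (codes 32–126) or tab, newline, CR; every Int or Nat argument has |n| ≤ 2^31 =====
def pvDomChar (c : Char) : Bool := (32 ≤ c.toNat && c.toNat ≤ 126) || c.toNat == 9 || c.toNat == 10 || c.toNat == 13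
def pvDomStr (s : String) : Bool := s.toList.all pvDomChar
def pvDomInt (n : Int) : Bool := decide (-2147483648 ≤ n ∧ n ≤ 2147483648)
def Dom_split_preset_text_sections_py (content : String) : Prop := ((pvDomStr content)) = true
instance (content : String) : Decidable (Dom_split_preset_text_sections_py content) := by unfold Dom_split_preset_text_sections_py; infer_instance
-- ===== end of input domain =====

-- B parses the preset in one header/base/filter state-machine pass instead of A's
-- indexed header scan + first-filter-index search + slicing (alternative decomposition).


-- ===== PORT A =====
-- the header loop: running absolute index i, accumulated header lines; returns
-- (header_lines, content_start_idx, broke?) — broke? = false is Python's for-else path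
def pvA_header : List String → Nat → List String → (List String × Nat × Bool)
  | [], i, acc => (acc, i, false)
  | raw :: rest, i, acc =>
      let stripped := PySem.Str.strip raw
      if PySem.Str.startswith stripped "#" || stripped == "" then
        pvA_header rest (i + 1) (acc ++ [raw])
      else (acc, i, true)

-- the first_filter_idx loop (index i, first match wins)
def pvA_findFilter : List String → Nat → Option Nat
  | [], _ => none
  | raw :: rest, i =>
      let stripped := PySem.Str.lower (PySem.Str.strip raw)
      if PySem.Str.startswith stripped "--filter-tcp" || PySem.Str.startswith stripped "--filter-udp"
          || PySem.Str.startswith stripped "--filter-l7" then some i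
      else pvA_findFilter rest (i + 1)

-- the comprehension body: ln.strip() if ln.strip() non-empty and not a comment
def pvA_baseF (ln : String) : Option String :=
  let s := PySem.Str.strip ln
  if s == "" || PySem.Str.startswith s "#" then none else some s

-- one iteration of the blocks loop over state (blocks, current)
def pvA_blockStep (st : List (List String) × List String) (raw : String) :
    List (List String) × List String :=
  let stripped := PySem.Str.strip raw
  if stripped == "" || PySem.Str.startswith stripped "#" then st
  else if stripped == "--new" then
    (if st.2 == [] then st else (st.1 ++ [st.2], []))
  else (st.1, st.2 ++ [stripped])

def split_preset_text_sections_py (content : String) : List String × List String × List (List String) :=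
  -- (content or "") = content for strings; lines[idx:] with 0 ≤ idx is List.drop (exact)
  let text := PySem.Str.replace (PySem.Str.replace content "\r\n" "\n") "\r" "\n"
  let lines := (PySem.Str.split? text "\n").getD []
  match pvA_header lines 0 [] with
  | (header, _, false) => (header, [], [])
  | (header, idx, true) =>
      let remaining := lines.drop idx
      match pvA_findFilter remaining 0 with
      | none => (header, remaining.filterMap pvA_baseF, [])
      | some k =>
          let base := (remaining.take k).filterMap pvA_baseF
          let st := (remaining.drop k).foldl pvA_blockStep ([], [])
          (header, base, if st.2 == [] then st.1 else st.1 ++ [st.2])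

-- ===== PORT B =====
-- the filter-state body of Source B's loop: updates (blocks, current) from one stripped line
def pvB_filterStep (stripped : String) (blocks : List (List String)) (cur : List String) :
    List (List String) × List String :=
  if stripped == "" || PySem.Str.startswith stripped "#" then (blocks, cur)
  else if stripped == "--new" then
    ((if cur == [] then blocks else blocks ++ [cur]), [])
  else (blocks, cur ++ [stripped])

-- Source B's for loop: st = 0 'header', 1 'base', 2 'filter'; accumulators h, b, blocks, cur
def pvB_go : List String → Nat → List String → List String → List (List String) → List String →
    List String × List String × List (List String)
  | [], _, h, b, blocks, cur => (h, b, if cur == [] then blocks else blocks ++ [cur])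
  | raw :: rest, st, h, b, blocks, cur =>
      let stripped := PySem.Str.strip raw
      if st == 0 && (stripped == "" || PySem.Str.startswith stripped "#") then
        pvB_go rest 0 (h ++ [raw]) b blocks cur
      else
        let st := if st == 0 then 1 else st
        if st == 1 then
          let low := PySem.Str.lower stripped
          if PySem.Str.startswith low "--filter-tcp" || PySem.Str.startswith low "--filter-udp"
              || PySem.Str.startswith low "--filter-l7" then
            let p := pvB_filterStep stripped blocks cur
            pvB_go rest 2 h b p.1 p.2
          else
            pvB_go rest 1 h
              (if !(stripped == "") && !(PySem.Str.startswith stripped "#") then b ++ [stripped] else b)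
              blocks cur
        else
          let p := pvB_filterStep stripped blocks cur
          pvB_go rest 2 h b p.1 p.2

def split_preset_text_sections_py_alt (content : String) : List String × List String × List (List String) :=
  let lines := (PySem.Str.split? (PySem.Str.replace (PySem.Str.replace content "\r\n" "\n") "\r" "\n") "\n").getD []
  pvB_go lines 0 [] [] [] []

-- ===== PRECONDITION & SPEC =====
def Spec_split_preset_text_sections_py (content : String) (out : List String × List String × List (List String)) : Prop := out = split_preset_text_sections_py_alt content
instance (content : String) (out : List String × List String × List (List String)) : Decidable (Spec_split_preset_text_sections_py content out) := by unfold Spec_split_preset_text_sections_py; infer_instance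

-- ===== CLAIM (what is proved, stated in full; the proofs are below) =====
def Claim_equal_split_preset_text_sections_py : Prop := ∀ (content : String), Dom_split_preset_text_sections_py content → Spec_split_preset_text_sections_py content (split_preset_text_sections_py content)

-- ===== LEMMAS AND PROOFS =====

-- pvB_filterStep on a stripped line is one pvA_blockStep iteration
theorem pv_step_eq (blocks : List (List String)) (cur : List String) (raw : String) :
    pvB_filterStep (PySem.Str.strip raw) blocks cur = pvA_blockStep (blocks, cur) raw := by
  simp only [pvA_blockStep, pvB_filterStep]
  split_ifs <;> simp_all

-- the filter state of B is A's blocks fold plus the final flush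
theorem pvB_go_filter (rest : List String) (h b : List String)
    (blocks : List (List String)) (cur : List String) :
    pvB_go rest 2 h b blocks cur =
      (h, b,
        (let st := rest.foldl pvA_blockStep (blocks, cur);
         if st.2 == [] then st.1 else st.1 ++ [st.2])) := by
  induction rest generalizing blocks cur with
  | nil => simp [pvB_go]
  | cons raw rest ih =>
      simp only [pvB_go, List.foldl_cons]
      rw [pv_step_eq]
      exact ih _ _

theorem pv_findFilter_succ (rest : List String) (i : Nat) :
    pvA_findFilter rest (i + 1) = (pvA_findFilter rest i).map (· + 1) := by
  induction rest generalizing i with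
  | nil => simp [pvA_findFilter]
  | cons raw rest ih =>
      simp only [pvA_findFilter]
      split
      · simp
      · exact ih (i + 1)

-- the base state of B is A's find-first-filter + take/drop decomposition
theorem pvB_go_base (rest : List String) (h b : List String) :
    pvB_go rest 1 h b [] [] =
      (match pvA_findFilter rest 0 with
       | none => (h, b ++ rest.filterMap pvA_baseF, [])
       | some k =>
           (h, b ++ (rest.take k).filterMap pvA_baseF,
            (let st := (rest.drop k).foldl pvA_blockStep ([], []);
             if st.2 == [] then st.1 else st.1 ++ [st.2]))) := by
  induction rest generalizing b with
  | nil => simp [pvB_go, pvA_findFilter]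
  | cons raw rest ih =>
      simp only [pvA_findFilter, pvB_go]
      by_cases hf : (PySem.Str.startswith (PySem.Str.lower (PySem.Str.strip raw)) "--filter-tcp"
          || PySem.Str.startswith (PySem.Str.lower (PySem.Str.strip raw)) "--filter-udp"
          || PySem.Str.startswith (PySem.Str.lower (PySem.Str.strip raw)) "--filter-l7") = true
      · simp only [hf, if_pos]
        rw [pvB_go_filter]
        rw [pv_step_eq]
        simp [List.foldl_cons]
      · simp only [hf, if_neg, Bool.false_eq_true, not_false_eq_true]
        rw [ih]
        rw [pv_findFilter_succ]
        cases hk : pvA_findFilter rest 0 with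
        | none =>
            simp only [Option.map_none]
            by_cases hb : (PySem.Str.strip raw == "" || PySem.Str.startswith (PySem.Str.strip raw) "#") = true
            · simp_all [pvA_baseF]
              tauto
            · simp_all [pvA_baseF]
        | some k =>
            simp only [Option.map_some]
            by_cases hb : (PySem.Str.strip raw == "" || PySem.Str.startswith (PySem.Str.strip raw) "#") = true
            · simp_all [pvA_baseF, List.take_succ_cons, List.drop_succ_cons]
              tauto
            · simp_all [pvA_baseF, List.take_succ_cons, List.drop_succ_cons]

theorem pv_header_shift (rest : List String) (i : Nat) (acc : List String) :
    pvA_header rest (i + 1) acc =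
      ((pvA_header rest i acc).1, (pvA_header rest i acc).2.1 + 1, (pvA_header rest i acc).2.2) := by
  induction rest generalizing i acc with
  | nil => simp [pvA_header]
  | cons raw rest ih =>
      simp only [pvA_header]
      split
      · exact ih (i + 1) _
      · simp

-- B's whole loop equals A's three-phase decomposition (h = header accumulated so far)
theorem pv_main (lines : List String) (h : List String) :
    pvB_go lines 0 h [] [] [] =
      (match pvA_header lines 0 h with
       | (header, _, false) => (header, [], [])
       | (header, idx, true) =>
           (match pvA_findFilter (lines.drop idx) 0 with
            | none => (header, (lines.drop idx).filterMap pvA_baseF, [])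
            | some k =>
                (header, ((lines.drop idx).take k).filterMap pvA_baseF,
                 (let st := ((lines.drop idx).drop k).foldl pvA_blockStep ([], []);
                  if st.2 == [] then st.1 else st.1 ++ [st.2])))) := by
  induction lines generalizing h with
  | nil => simp [pvB_go, pvA_header]
  | cons raw rest ih =>
      by_cases hh : (PySem.Str.startswith (PySem.Str.strip raw) "#" || PySem.Str.strip raw == "") = true
      · have hh' : (PySem.Str.strip raw == "" || PySem.Str.startswith (PySem.Str.strip raw) "#") = true := by
          rw [Bool.or_comm]; exact hh
        simp only [pvA_header, hh, if_pos, pvB_go, hh', Nat.zero_add, Bool.and_true,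
          beq_self_eq_true]
        rw [ih (h ++ [raw])]
        rw [pv_header_shift]
        rcases he : pvA_header rest 0 (h ++ [raw]) with ⟨header, idx, br⟩
        cases br <;> simp [List.drop_succ_cons]
      · simp [not_or] at hh
        obtain ⟨hst, hne⟩ := hh
        have hgo : pvB_go (raw :: rest) 0 h [] [] [] = pvB_go (raw :: rest) 1 h [] [] [] := by
          simp [pvB_go, hst, hne]
        rw [hgo, pvB_go_base]
        simp [pvA_header, hst, hne]

-- ===== VERDICT (by name: the statement is the Claim_ definition above) =====
theorem split_preset_text_sections_py_spec : Claim_equal_split_preset_text_sections_py := by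
  intro content _
  unfold Spec_split_preset_text_sections_py split_preset_text_sections_py split_preset_text_sections_py_alt
  rw [pv_main]
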